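-- pv_equiv track=rewrite | github.com/LeeDoor/garlic | src/tests/sql_parser/select_literal_tests/runner/match.py | prepare_actual_lines
-- ===== SOURCE A (Python) =====
-- def normalize_lines(content: str) -> list[str]:
--     return content.splitlines()
--
-- def strip_cli_prompt_prefix(line: str) -> str:
--     while line.startswith("#>"):
--         line = line[2:]
--         if line.startswith(" "):
--             line = line[1:]
--     return line
--
-- def prepare_actual_lines(mode: str, actual_output: str) -> list[str]:
--     lines = normalize_lines(actual_output)
--     if mode != "location_cli":
--         return lines
--
--     prepared = [strip_cli_prompt_prefix(line) for line in lines]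
--     while prepared and prepared[0] == "":
--         prepared.pop(0)
--     return prepared
-- ===== SOURCE B (Python) =====
-- def prepare_actual_lines(mode: str, actual_output: str) -> list[str]:
--     if mode != "location_cli":
--         return actual_output.splitlines()
--     # Single character-level scan: no splitlines, no per-line pass, no pop loop.
--     out = []
--     emitted = False
--     i, n = 0, len(actual_output)
--     while i < n:
--         # at start of a line: skip prompt tokens '#>' each with at most one space
--         while actual_output.startswith("#>", i):
--             i += 2
--             if i < n and actual_output[i] == " ":
--                 i += 1
--         # collect the line up to the next break
--         j = i
--         while j < n and actual_output[j] not in "\r\n":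
--             j += 1
--         line = actual_output[i:j]
--         if line or emitted:
--             out.append(line)
--             emitted = True
--         # consume the break ('\r\n' counts as one)
--         if j < n:
--             if actual_output[j] == "\r" and j + 1 < n and actual_output[j + 1] == "\n":
--                 j += 2
--             else:
--                 j += 1
--         i = j
--     return out
-- ===== Notes on version B (the rewrite author's own statement) =====
-- stated objective: alternative
-- what changed: A does three staged passes (splitlines, a per-line prompt-stripping comprehension, then a pop(0) loop for leading blanks); B is one fused character-level scan of the raw string with an index and an 'emitted' flag, skipping '#>'-tokens at line starts, cutting lines at \n/\r/\r\n itself, and never materialising the intermediate lists.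
import Mathlib
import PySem

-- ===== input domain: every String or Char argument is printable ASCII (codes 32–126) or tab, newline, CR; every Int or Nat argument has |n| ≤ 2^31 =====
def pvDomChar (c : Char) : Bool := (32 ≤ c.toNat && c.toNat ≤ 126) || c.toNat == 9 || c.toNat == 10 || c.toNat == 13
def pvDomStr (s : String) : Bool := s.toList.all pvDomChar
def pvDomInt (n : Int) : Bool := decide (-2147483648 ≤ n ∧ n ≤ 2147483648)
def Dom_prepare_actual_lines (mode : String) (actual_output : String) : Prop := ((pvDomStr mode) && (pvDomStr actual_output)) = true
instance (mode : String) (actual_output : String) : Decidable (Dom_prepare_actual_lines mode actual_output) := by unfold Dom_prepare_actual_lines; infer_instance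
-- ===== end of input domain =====

-- B replaces A's three staged passes (splitlines, per-line strip comprehension, pop(0) loop)
-- by ONE fused character-level scan of the raw string with an 'emitted' flag; objective:
-- alternative single-pass algorithm, same asymptotic cost.

-- ===== PORT A =====
-- def normalize_lines(content): return content.splitlines()
def pvNormalizeLines (content : String) : List String := PySem.Str.splitlines content

-- while line.startswith("#>"): line = line[2:]; if line.startswith(" "): line = line[1:]
-- (ported on List Char; PySem.Str functions are thin wrappers over the same code points)
def pvStripA (line : List Char) : List Char :=
  if h : PySem.Chars.startswith line ['#', '>'] = true then
    let line1 := PySem.Chars.slice line (some 2) none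
    let line2 := if PySem.Chars.startswith line1 [' '] = true then PySem.Chars.slice line1 (some 1) none else line1
    pvStripA line2
  else
    line
termination_by line.length
decreasing_by
  obtain ⟨t, rfl⟩ := (PySem.Chars.startswith_iff line ['#', '>']).mp h
  simp only [List.cons_append, List.nil_append]
  have h1 : PySem.Chars.slice ('#'::'>'::t) (some 2) none = t := by simp [pysem]
  rw [h1]
  split
  · next hs =>
      obtain ⟨t', rfl⟩ := (PySem.Chars.startswith_iff t [' ']).mp hs
      simp only [List.cons_append, List.nil_append]
      have h2 : PySem.Chars.slice (' '::t') (some 1) none = t' := by simp [pysem]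
      rw [h2]; simp; omega
  · simp

def strip_cli_prompt_prefix (line : String) : String := String.ofList (pvStripA line.toList)

-- while prepared and prepared[0] == "": prepared.pop(0)
def pvPopLeading : List String → List String
  | [] => []
  | s :: rest => if s = "" then pvPopLeading rest else s :: rest

def prepare_actual_lines (mode : String) (actual_output : String) : List String :=
  let lines := pvNormalizeLines actual_output
  if mode ≠ "location_cli" then lines
  else pvPopLeading (lines.map strip_cli_prompt_prefix)

-- ===== PORT B =====
-- inner while of Source B: while s.startswith("#>", i): i += 2; if s[i] == " ": i += 1
-- (position i is represented by the remaining suffix of the character list)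
def pvSkip : List Char → List Char
  | '#' :: '>' :: ' ' :: rest => pvSkip rest
  | '#' :: '>' :: rest => pvSkip rest
  | s => s

-- middle while of Source B: j scans to the next break, then the break is consumed
-- ('\r\n' as one); returns (the line s[i:j], the suffix after the consumed break)
def pvCollect : List Char → List Char × List Char
  | [] => ([], [])
  | '\n' :: rest => ([], rest)
  | '\r' :: '\n' :: rest => ([], rest)
  | '\r' :: rest => ([], rest)
  | c :: rest => let p := pvCollect rest; (c :: p.1, p.2)

lemma pvSkip_len_le (s : List Char) : (pvSkip s).length ≤ s.length := by
  fun_induction pvSkip s <;> simp <;> omega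

lemma pvCollect_rest_lt (s : List Char) (h : s ≠ []) : (pvCollect s).2.length < s.length := by
  fun_induction pvCollect s with
  | case1 => exact absurd rfl h
  | case2 => simp
  | case3 => simp
  | case4 => simp
  | case5 c rest h1 h2 h3 p ih =>
      by_cases hr : rest = []
      · subst hr; simp [p, pvCollect]
      · have := ih hr; simp [p]; omega

-- outer while of Source B, with the 'emitted' flag
def pvScanB (s : List Char) (emitted : Bool) : List String :=
  match hs : s with
  | [] => []
  | _ :: _ =>
      let p := pvCollect (pvSkip s)
      if p.1.isEmpty && !emitted then pvScanB p.2 false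
      else String.ofList p.1 :: pvScanB p.2 true
termination_by s.length
decreasing_by
  all_goals
    subst hs
    by_cases h0 : pvSkip (‹Char› :: ‹List Char›) = []
    · simp_all [pvCollect]
    · calc (pvCollect (pvSkip _)).2.length < (pvSkip _).length := pvCollect_rest_lt _ h0
        _ ≤ _ := pvSkip_len_le _

def prepare_actual_lines_alt (mode : String) (actual_output : String) : List String :=
  if mode ≠ "location_cli" then PySem.Str.splitlines actual_output
  else pvScanB actual_output.toList false

-- ===== PRECONDITION & SPEC =====
def Spec_prepare_actual_lines (mode : String) (actual_output : String) (out : List String) : Prop := out = prepare_actual_lines_alt mode actual_output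
instance (mode : String) (actual_output : String) (out : List String) : Decidable (Spec_prepare_actual_lines mode actual_output out) := by unfold Spec_prepare_actual_lines; infer_instance

-- ===== CLAIM (what is proved, stated in full; the proofs are below) =====
def Claim_equal_prepare_actual_lines : Prop := ∀ (mode : String) (actual_output : String), Dom_prepare_actual_lines mode actual_output → Spec_prepare_actual_lines mode actual_output (prepare_actual_lines mode actual_output)

-- ===== LEMMAS AND PROOFS =====

def pvIsB (c : Char) : Bool :=
  decide (c.toNat = 10) || decide (c.toNat = 13) || decide (c.toNat = 11) || decide (c.toNat = 12) ||
  decide (c.toNat = 28) || decide (c.toNat = 29) || decide (c.toNat = 30) || decide (c.toNat = 133) ||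
  decide (c.toNat = 8232) || decide (c.toNat = 8233)

def pvLinesAux (isB : Char → Bool) : List Char → List Char → List (List Char)
  | cur, [] => if cur.isEmpty then [] else [cur.reverse]
  | cur, '\x0d' :: '\n' :: rest => cur.reverse :: pvLinesAux isB [] rest
  | cur, c :: rest => if isB c then cur.reverse :: pvLinesAux isB [] rest else pvLinesAux isB (c :: cur) rest

lemma pvGo_eq (isB : Char → Bool) (s cur : List Char) (acc : List (List Char)) :
    PySem.Chars.splitlines.go isB s cur acc = acc.reverse ++ pvLinesAux isB cur s := by
  fun_induction pvLinesAux isB cur s generalizing acc with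
  | case1 cur h => rw [PySem.Chars.splitlines.go]; simp [h]
  | case2 cur h => rw [PySem.Chars.splitlines.go]; simp [h]
  | case3 cur rest ih => rw [PySem.Chars.splitlines.go, ih]; simp
  | case4 cur c rest hne h ih =>
      rw [PySem.Chars.splitlines.go.eq_def]
      split
      · simp_all
      · next rest' heq => injection heq with h1 h2; exact (hne rest' h1 h2).elim
      · next c' rest' hx heq =>
          injection heq with h1 h2; subst h1; subst h2
          simp [h, ih]
  | case5 cur c rest hne h ih =>
      rw [PySem.Chars.splitlines.go.eq_def]
      split
      · simp_all
      · next rest' heq => injection heq with h1 h2; exact (hne rest' h1 h2).elim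
      · next c' rest' hx heq =>
          injection heq with h1 h2; subst h1; subst h2
          simp [h, ih]

lemma pvSplitlines_eq (s : List Char) : PySem.Chars.splitlines s = pvLinesAux pvIsB [] s := by
  rw [PySem.Chars.splitlines, pvGo_eq]; rfl

def pvNoBrk (l : List Char) : Prop := ∀ c ∈ l, c.toNat ≠ 10 ∧ c.toNat ≠ 13

lemma pvIsB_false (c : Char) (hd : pvDomChar c = true) (h10 : c.toNat ≠ 10) (h13 : c.toNat ≠ 13) :
    pvIsB c = false := by
  simp [pvIsB, pvDomChar] at *
  omega

lemma pvCollect_decomp (s : List Char) (hs : s ≠ []) :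
    ∃ l t r, s = l ++ t ∧ pvNoBrk l ∧ pvCollect s = (l, r) ∧
      ((t = [] ∧ r = []) ∨ t = '\n' :: r ∨ t = '\x0d' :: '\n' :: r ∨
        (t = '\x0d' :: r ∧ ∀ u, r ≠ '\n' :: u)) := by
  fun_induction pvCollect s with
  | case1 => exact absurd rfl hs
  | case2 rest => exact ⟨[], '\n'::rest, rest, by simp [pvNoBrk, pvCollect]⟩
  | case3 rest => exact ⟨[], '\x0d'::'\n'::rest, rest, by simp [pvNoBrk, pvCollect]⟩
  | case4 rest h2 =>
      refine ⟨[], '\x0d'::rest, rest, by simp, by simp [pvNoBrk], by simp [pvCollect], ?_⟩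
      right; right; right
      exact ⟨rfl, fun u hu => h2 u hu⟩
  | case5 c rest h1 h2 h3 p ih =>
      have hc : c.toNat ≠ 10 ∧ c.toNat ≠ 13 := by
        constructor
        · intro h; exact h1 (by ext; simpa using h)
        · intro h; exact h3 (by ext; simpa using h)
      by_cases hr : rest = []
      · subst hr
        refine ⟨[c], [], [], by simp, ?_, by simp [p, pvCollect], by simp⟩
        intro d hd; simp at hd; subst hd; exact hc
      · obtain ⟨l, t, r, hseq, hnb, hcol, hsep⟩ := ih hr
        refine ⟨c::l, t, r, by simp [hseq], ?_, ?_, hsep⟩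
        · intro d hd
          rcases List.mem_cons.mp hd with rfl | hd'
          · exact hc
          · exact hnb d hd'
        · simp [p, hcol]

lemma pvLinesAux_step (s : List Char) (hdom : s.all pvDomChar = true) (hs : s ≠ []) (cur : List Char) :
    pvLinesAux pvIsB cur s = (cur.reverse ++ (pvCollect s).1) :: pvLinesAux pvIsB [] (pvCollect s).2 := by
  fun_induction pvCollect s generalizing cur with
  | case1 => exact absurd rfl hs
  | case2 rest => simp [pvLinesAux, pvIsB]
  | case3 rest => simp [pvLinesAux]
  | case4 rest h2 =>
      rw [pvLinesAux.eq_def]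
      split
      · simp_all
      · next heq => injection heq with ha hb; exact (h2 _ hb).elim
      · next c' rest' hx heq =>
          injection heq with ha hb; subst ha; subst hb
          simp [pvIsB, pvCollect]
  | case5 c rest h1 h2 h3 p ih =>
      simp only [List.all_cons, Bool.and_eq_true] at hdom
      have hc10 : c.toNat ≠ 10 := fun h => h1 (by ext; simpa using h)
      have hc13 : c.toNat ≠ 13 := fun h => h3 (by ext; simpa using h)
      have hb : pvIsB c = false := pvIsB_false c hdom.1 hc10 hc13
      rw [pvLinesAux.eq_def]
      split
      · simp_all
      · next heq =>
          injection heq with ha hb'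
          exact (h3 ha).elim
      · next cur' c' rest' hx heq =>
          injection heq with ha hb'; subst ha; subst hb'
          rw [hb]
          simp only [Bool.false_eq_true, if_false]
          by_cases hr : rest = []
          · subst hr; simp [p, pvCollect, pvLinesAux]
          · rw [ih hdom.2 hr]
            simp [p]

lemma pvSkip_sp (u : List Char) : pvSkip ('#'::'>'::' '::u) = pvSkip u := rfl

lemma pvSkip_two : pvSkip ['#','>'] = [] := by decide

lemma pvSkip_nosp (c : Char) (u : List Char) (hc : c ≠ ' ') :
    pvSkip ('#'::'>'::c::u) = pvSkip (c::u) := by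
  rw [pvSkip.eq_def]
  split
  · next rest heq =>
      injection heq with _ h2; injection h2 with _ h3; injection h3 with h4 _
      exact (hc h4).elim
  · next rest hx heq =>
      injection heq with _ h2; injection h2 with _ h3; rw [h3]
  · next hx1 hx2 => exact ((hx2 (c :: u)) rfl).elim

lemma pvSkip_noop (s : List Char) (h : ∀ u, s ≠ '#'::'>'::u) : pvSkip s = s := by
  rw [pvSkip.eq_def]
  split
  · next x rest => exact (h (' ' :: rest) rfl).elim
  · next x rest hx => exact (h rest rfl).elim
  · rfl

lemma pvSkip_append (l t : List Char) (hl : pvNoBrk l)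
    (ht : t = [] ∨ (∃ u, t = '\n' :: u) ∨ (∃ u, t = '\x0d' :: u)) :
    pvSkip (l ++ t) = pvStripA l ++ t := by
  have htH : ∀ c u, t = c :: u → c ≠ '#' ∧ c ≠ ' ' ∧ c ≠ '>' := by
    rintro c u rfl
    rcases ht with h | ⟨u', h⟩ | ⟨u', h⟩
    · simp at h
    · injection h with h1 _; subst h1; exact ⟨by decide, by decide, by decide⟩
    · injection h with h1 _; subst h1; exact ⟨by decide, by decide, by decide⟩
  have hSkipT : pvSkip t = t := by
    apply pvSkip_noop
    intro u hu
    exact (htH _ _ hu).1 rfl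
  fun_induction pvStripA l with
  | case1 l h line1 line2 ih =>
      obtain ⟨t0, rfl⟩ := (PySem.Chars.startswith_iff l ['#', '>']).mp h
      simp only [List.cons_append, List.nil_append] at *
      have h1 : line1 = t0 := by simp [line1, pysem]
      have hnb0 : pvNoBrk t0 := fun c hc => hl c (by simp [hc])
      by_cases hs : PySem.Chars.startswith t0 [' '] = true
      · obtain ⟨t', rfl⟩ := (PySem.Chars.startswith_iff t0 [' ']).mp hs
        have h2 : line2 = t' := by simp [line2, h1, pysem]
        rw [h2] at ih ⊢
        have ihh := ih (fun c hc => hnb0 c (by simp [hc]))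
        simp only [List.cons_append, List.nil_append] at ihh ⊢
        rw [pvSkip_sp, ihh]
      · have h2 : line2 = t0 := by simp [line2, h1, hs]
        rw [h2] at ih ⊢
        have ihh := ih hnb0
        match t0, hs, hnb0, ihh with
        | [], _, _, ihh =>
            simp only [List.nil_append] at ihh ⊢
            rcases ht with rfl | ⟨u', rfl⟩ | ⟨u', rfl⟩
            · simp only [List.append_nil]
              rw [show pvStripA [] = [] by rw [pvStripA]; simp [PySem.Chars.startswith]]
              exact pvSkip_two
            · rw [pvSkip_nosp _ _ (by decide), ihh]
            · rw [pvSkip_nosp _ _ (by decide), ihh]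
        | d :: t0', hs, _, ihh =>
            have hd : d ≠ ' ' := by
              intro hdd; subst hdd
              exact hs ((PySem.Chars.startswith_iff _ _).mpr ⟨t0', rfl⟩)
            simp only [List.cons_append, List.nil_append] at ihh ⊢
            rw [pvSkip_nosp _ _ hd, ihh]
  | case2 l h =>
      apply pvSkip_noop
      intro u hu
      match l, hl, h, hu with
      | [], _, _, hu => exact (htH _ _ hu).1 rfl
      | [c], _, _, hu =>
          injection hu with h1 h2
          exact (htH _ _ h2).2.2 rfl
      | c1 :: c2 :: l'', _, h, hu =>
          injection hu with h1 h2; injection h2 with h3 _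
          subst h1; subst h3
          exact h ((PySem.Chars.startswith_iff _ _).mpr ⟨l'', rfl⟩)

lemma pvStripA_suffix (l : List Char) : pvStripA l <:+ l := by
  fun_induction pvStripA l with
  | case1 l h line1 line2 ih =>
      obtain ⟨t, rfl⟩ := (PySem.Chars.startswith_iff l ['#', '>']).mp h
      simp only [List.cons_append, List.nil_append] at *
      have h1 : line1 = t := by simp [line1, pysem]
      refine ih.trans ?_
      by_cases hs : PySem.Chars.startswith t [' '] = true
      · obtain ⟨t', rfl⟩ := (PySem.Chars.startswith_iff t [' ']).mp hs
        have h2 : line2 = t' := by simp [line2, h1, pysem]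
        rw [h2]; exact ⟨['#','>',' '], rfl⟩
      · have h2 : line2 = t := by simp [line2, h1, hs]
        rw [h2]; exact ⟨['#','>'], rfl⟩
  | case2 l h => exact List.suffix_rfl

lemma pvCollect_append (l t : List Char) (hl : pvNoBrk l) :
    pvCollect (l ++ t) = (l ++ (pvCollect t).1, (pvCollect t).2) := by
  induction l with
  | nil => simp
  | cons c l' ih =>
      have hc := hl c (List.mem_cons_self ..)
      have ih' := ih (fun d hd => hl d (List.mem_cons_of_mem _ hd))
      rw [List.cons_append, pvCollect.eq_def]
      split
      · next heq => exact absurd heq (by simp)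
      · next rest heq =>
          injection heq with ha _
          exact (hc.1 (by rw [ha]; rfl)).elim
      · next rest heq =>
          injection heq with ha _
          exact (hc.2 (by rw [ha]; rfl)).elim
      · next rest hx heq =>
          injection heq with ha _
          exact (hc.2 (by rw [ha]; rfl)).elim
      · next c' rest hx1 hx2 hx3 heq =>
          injection heq with ha hb
          subst ha; subst hb
          simp [ih']

lemma pvCollect_sep (t r : List Char)
    (hsep : (t = [] ∧ r = []) ∨ t = '\n' :: r ∨ t = '\x0d' :: '\n' :: r ∨
      (t = '\x0d' :: r ∧ ∀ u, r ≠ '\n' :: u)) :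
    pvCollect t = ([], r) := by
  rcases hsep with ⟨rfl, rfl⟩ | rfl | rfl | ⟨rfl, hr⟩
  · rfl
  · rfl
  · rfl
  · match r, hr with
    | [], _ => rfl
    | c :: u, hr =>
        rw [pvCollect.eq_def]
        split
        · next heq => exact absurd heq (by simp)
        · next rest heq => injection heq with ha _; exact absurd ha (by decide)
        · next rest heq =>
            injection heq with _ hb
            exact (hr rest hb).elim
        · next rest hx heq => injection heq with _ hb; rw [hb]
        · next c' rest hx1 hx2 hx3 heq =>
            injection heq with ha _
            exact (hx3 ha.symm).elim

lemma pvScan_main (n : Nat) (s : List Char) (hn : s.length ≤ n) (hdom : s.all pvDomChar = true) :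
    pvScanB s true = (pvLinesAux pvIsB [] s).map (fun l => String.ofList (pvStripA l)) ∧
    pvScanB s false = ((pvLinesAux pvIsB [] s).map (fun l => String.ofList (pvStripA l))).dropWhile (· == "") := by
  induction n generalizing s with
  | zero =>
      have : s = [] := List.eq_nil_of_length_eq_zero (Nat.le_zero.mp hn)
      subst this
      constructor <;> rw [pvScanB] <;> simp [pvLinesAux]
  | succ n ihn =>
      match hs : s with
      | [] => constructor <;> rw [pvScanB] <;> simp [pvLinesAux]
      | a :: s' =>
          obtain ⟨l, t, r, hseq, hnb, hcol, hsep⟩ := pvCollect_decomp (a :: s') (by simp)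
          have htShape : t = [] ∨ (∃ u, t = '\n' :: u) ∨ (∃ u, t = '\x0d' :: u) := by
            rcases hsep with ⟨rfl, _⟩ | rfl | rfl | ⟨rfl, _⟩
            · exact Or.inl rfl
            · exact Or.inr (Or.inl ⟨r, rfl⟩)
            · exact Or.inr (Or.inr ⟨'\n'::r, rfl⟩)
            · exact Or.inr (Or.inr ⟨r, rfl⟩)
          have hct : pvCollect t = ([], r) := pvCollect_sep t r hsep
          have hskip : pvSkip (a :: s') = pvStripA l ++ t := by
            rw [hseq]; exact pvSkip_append l t hnb htShape
          have hnbs : pvNoBrk (pvStripA l) := fun c hc => hnb c ((pvStripA_suffix l).sublist.mem hc)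
          have hcps : pvCollect (pvSkip (a :: s')) = (pvStripA l, r) := by
            rw [hskip, pvCollect_append _ _ hnbs, hct]
            simp
          have hrt : r.Sublist t := by
            rcases hsep with ⟨rfl, rfl⟩ | rfl | rfl | ⟨rfl, _⟩
            · simp
            · exact List.sublist_cons_self _ _
            · exact (List.sublist_cons_self _ _).trans (List.sublist_cons_self _ _)
            · exact List.sublist_cons_self _ _
          have hrsub : r.Sublist (a :: s') := by
            rw [hseq]; exact hrt.trans (List.sublist_append_right l t)
          have hdomr : r.all pvDomChar = true := by
            rw [List.all_eq_true] at hdom ⊢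
            exact fun c hc => hdom c (hrsub.mem hc)
          have hrlen : r.length ≤ n := by
            have h1 : (pvCollect (a :: s')).2.length < (a :: s').length := pvCollect_rest_lt _ (by simp)
            rw [hcol] at h1
            simp at h1 hn
            omega
          have ihr := ihn r hrlen hdomr
          have hstep := pvLinesAux_step (a :: s') hdom (by simp) []
          rw [hcol] at hstep
          simp only [List.reverse_nil, List.nil_append] at hstep
          constructor
          · rw [pvScanB, hstep]
            simp only [hcps, List.map_cons]
            rw [ihr.1]
            simp
          · rw [pvScanB, hstep]
            simp only [hcps, List.map_cons]
            by_cases hemp : pvStripA l = []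
            · rw [hemp]
              simp [ihr.2]
            · simp [ihr.1, hemp, List.isEmpty_iff]

lemma pvPopLeading_eq (l : List String) : pvPopLeading l = l.dropWhile (· == "") := by
  induction l with
  | nil => rfl
  | cons s rest ih =>
      by_cases hs : s = "" <;> simp [pvPopLeading, hs, ih]

-- ===== VERDICT (by name: the statement is the Claim_ definition above) =====
theorem prepare_actual_lines_spec : Claim_equal_prepare_actual_lines := by
  intro mode s hdom
  unfold Spec_prepare_actual_lines prepare_actual_lines prepare_actual_lines_alt pvNormalizeLines
  by_cases hm : mode = "location_cli"
  · simp only [hm, ne_eq, not_true_eq_false, if_false]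
    have hdomS : s.toList.all pvDomChar = true := by
      unfold Dom_prepare_actual_lines pvDomStr at hdom
      exact (Bool.and_eq_true_iff.mp hdom).2
    have hmap : (PySem.Str.splitlines s).map strip_cli_prompt_prefix
        = (pvLinesAux pvIsB [] s.toList).map (fun l => String.ofList (pvStripA l)) := by
      rw [PySem.Str.splitlines, pvSplitlines_eq, List.map_map]
      exact List.map_congr_left fun l _ => by
        simp [strip_cli_prompt_prefix, Function.comp]
    rw [hmap, pvPopLeading_eq]
    exact ((pvScan_main s.toList.length s.toList le_rfl hdomS).2).symm
  · simp [hm]
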